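-- pv_equiv track=rewrite | github.com/Riccorl/transformer-srl | transformer_srl/dataset_readers.py | _convert_verb_indices_to_wordpiece_indices
-- ===== SOURCE A (Python) =====
-- from typing import Any, DefaultDict, Dict, List, Set, Tuple
--
-- def _convert_verb_indices_to_wordpiece_indices(
--     verb_indices: List[int], offsets: List[int], binary: bool = True
-- ):
--     """
--     Converts binary verb indicators to account for a wordpiece tokenizer,
--     extending/modifying BIO tags where appropriate to deal with words which
--     are split into multiple wordpieces by the tokenizer.
--
--     This is only used if you pass a `model_name` to the dataset reader below.
--
--     # Parameters
--
--     verb_indices : `List[int]`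
--         The binary verb indicators, 0 for not a verb, 1 for verb.
--     offsets : `List[int]`
--         The wordpiece offsets.
--
--     # Returns
--
--     The new verb indices.
--     """
--     j = 0
--     new_verb_indices = []
--     for i, offset in enumerate(offsets):
--         indicator = verb_indices[i]
--         while j < offset:
--             new_verb_indices.append(indicator)
--             j += 1
--
--     # Add 0 indicators for cls and sep tokens.
--     if binary:
--         return [0] + new_verb_indices + [0]
--     else:
--         return ["O"] + new_verb_indices + ["O"]
-- ===== SOURCE B (Python) =====
-- def _convert_verb_indices_to_wordpiece_indices(
--     verb_indices, offsets, binary=True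
-- ):
--     # Prefix-difference pass: per-word wordpiece width from the cumulative
--     # offsets, carrying a running maximum (matches the original's global j).
--     widths = []
--     running = 0
--     for off in offsets:
--         widths.append(max(0, off - running))
--         running = max(running, off)
--     # Expansion pass: repeat each indicator by its width.
--     body = [ind for ind, w in zip(verb_indices, widths) for _ in range(w)]
--     if binary:
--         return [0] + body + [0]
--     return ["O"] + body + ["O"]
-- ===== Notes on version B (the rewrite author's own statement) =====
-- stated objective: alternative
-- what changed: Replaces the nested outer-loop/inner-while fill over a global counter j by two flat passes: a running-max prefix-difference pass computing per-word widths, then a single flat comprehension expanding each indicator by its width.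
-- outside the precondition, e.g. on _convert_verb_indices_to_wordpiece_indices([1], [2], False): A returns ['O', 1, 1, 'O'], B returns ['O', 1, 1, 'O']; on _convert_verb_indices_to_wordpiece_indices([], [1], True): A raises IndexError, B returns [0, 0]
import Mathlib
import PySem

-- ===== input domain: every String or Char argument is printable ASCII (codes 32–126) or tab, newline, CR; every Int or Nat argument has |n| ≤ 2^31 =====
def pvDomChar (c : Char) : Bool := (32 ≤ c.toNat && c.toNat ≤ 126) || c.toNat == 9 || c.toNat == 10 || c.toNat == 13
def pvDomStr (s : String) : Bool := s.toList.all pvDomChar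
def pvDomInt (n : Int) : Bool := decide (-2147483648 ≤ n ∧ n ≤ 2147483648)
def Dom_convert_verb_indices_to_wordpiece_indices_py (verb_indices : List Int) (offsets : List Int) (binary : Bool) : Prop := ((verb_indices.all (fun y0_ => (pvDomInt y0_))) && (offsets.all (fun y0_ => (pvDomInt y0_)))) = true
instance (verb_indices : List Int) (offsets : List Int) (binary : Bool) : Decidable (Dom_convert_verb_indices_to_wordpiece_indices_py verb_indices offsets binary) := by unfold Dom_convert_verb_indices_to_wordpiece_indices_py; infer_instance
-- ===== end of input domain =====

-- B replaces A's nested loop/global-counter fill by a running-max width pass plus a flat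
-- expansion pass (objective: alternative decomposition, same cost).

-- ===== PORT A =====
-- the inner `while j < offset: append(indicator); j += 1` loop of A
def pyA_while (ind : Int) (j : Int) (off : Int) (acc : List Int) : Int × List Int :=
  if j < off then pyA_while ind (j + 1) off (acc ++ [ind]) else (j, acc)
  termination_by (off - j).toNat
  decreasing_by omega

def convert_verb_indices_to_wordpiece_indices_py (verb_indices : List Int) (offsets : List Int) (binary : Bool) : List Int :=
  let st := (PySem.List.enumerate offsets 0).foldl
    (fun (s : Int × List Int) io =>
      -- indicator = verb_indices[i]; out-of-range (IndexError) is excluded by Pre_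
      let indicator := (PySem.List.pyGet? verb_indices io.1).getD 0
      pyA_while indicator s.1 io.2 s.2)
    ((0 : Int), ([] : List Int))
  if binary then [0] ++ st.2 ++ [0]
  else [0] ++ st.2 ++ [0]  -- Python returns a list of strings here; excluded by Pre_

-- ===== PORT B =====
def convert_verb_indices_to_wordpiece_indices_py_alt (verb_indices : List Int) (offsets : List Int) (binary : Bool) : List Int :=
  let widths := (offsets.foldl
    (fun (p : Int × List Int) off => (max p.1 off, p.2 ++ [max 0 (off - p.1)]))
    ((0 : Int), ([] : List Int))).2
  let body := (verb_indices.zip widths).flatMap (fun iw => List.replicate iw.2.toNat iw.1)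
  if binary then [0] ++ body ++ [0]
  else [0] ++ body ++ [0]  -- Python returns a list of strings here; excluded by Pre_

-- ===== PRECONDITION & SPEC =====
-- Pre_ excludes binary = false, where A returns a list of strings ("O" markers), not a value
-- of the declared return type List Int, and offsets longer than verb_indices, where A raises
-- IndexError on verb_indices[i].
def Pre_convert_verb_indices_to_wordpiece_indices_py (verb_indices : List Int) (offsets : List Int) (binary : Bool) : Prop :=
  binary = true ∧ offsets.length ≤ verb_indices.length
instance (verb_indices : List Int) (offsets : List Int) (binary : Bool) : Decidable (Pre_convert_verb_indices_to_wordpiece_indices_py verb_indices offsets binary) := by unfold Pre_convert_verb_indices_to_wordpiece_indices_py; infer_instance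

def pvWitness_convert_verb_indices_to_wordpiece_indices_py : List Int × List Int × Bool := ([1, 0, 1], [2, 3, 5], true)

def Spec_convert_verb_indices_to_wordpiece_indices_py (verb_indices : List Int) (offsets : List Int) (binary : Bool) (out : List Int) : Prop := out = convert_verb_indices_to_wordpiece_indices_py_alt verb_indices offsets binary
instance (verb_indices : List Int) (offsets : List Int) (binary : Bool) (out : List Int) : Decidable (Spec_convert_verb_indices_to_wordpiece_indices_py verb_indices offsets binary out) := by unfold Spec_convert_verb_indices_to_wordpiece_indices_py; infer_instance

-- ===== CLAIM (what is proved, stated in full; the proofs are below) =====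
def Claim_equal_convert_verb_indices_to_wordpiece_indices_py : Prop := ∀ (verb_indices : List Int) (offsets : List Int) (binary : Bool), Dom_convert_verb_indices_to_wordpiece_indices_py verb_indices offsets binary → Pre_convert_verb_indices_to_wordpiece_indices_py verb_indices offsets binary → Spec_convert_verb_indices_to_wordpiece_indices_py verb_indices offsets binary (convert_verb_indices_to_wordpiece_indices_py verb_indices offsets binary)

-- ===== LEMMAS AND PROOFS =====

-- the running-max width list both sides compute
def pvW (offs : List Int) (j : Int) : List Int :=
  match offs with
  | [] => []
  | o :: t => max 0 (o - j) :: pvW t (max j o)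

theorem pvWitness_ok :
    Dom_convert_verb_indices_to_wordpiece_indices_py pvWitness_convert_verb_indices_to_wordpiece_indices_py.1 pvWitness_convert_verb_indices_to_wordpiece_indices_py.2.1 pvWitness_convert_verb_indices_to_wordpiece_indices_py.2.2 ∧
    Pre_convert_verb_indices_to_wordpiece_indices_py pvWitness_convert_verb_indices_to_wordpiece_indices_py.1 pvWitness_convert_verb_indices_to_wordpiece_indices_py.2.1 pvWitness_convert_verb_indices_to_wordpiece_indices_py.2.2 := by
  decide

theorem pyA_while_eq (ind j off : Int) (acc : List Int) :
    pyA_while ind j off acc = (max j off, acc ++ List.replicate (off - j).toNat ind) := by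
  by_cases h : j < off
  · rw [pyA_while, if_pos h, pyA_while_eq]
    have h1 : max (j + 1) off = max j off := by omega
    have h2 : (off - j).toNat = (off - (j + 1)).toNat + 1 := by omega
    rw [h1, h2, List.replicate_succ, List.append_assoc]
    simp
  · rw [pyA_while, if_neg h]
    have : (off - j).toNat = 0 := by omega
    simp [this]
    omega
  termination_by (off - j).toNat
  decreasing_by omega

theorem foldB_eq (offs : List Int) (j : Int) (ws : List Int) :
    offs.foldl (fun (p : Int × List Int) off => (max p.1 off, p.2 ++ [max 0 (off - p.1)])) (j, ws)
      = (offs.foldl max j, ws ++ pvW offs j) := by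
  induction offs generalizing j ws with
  | nil => simp [pvW]
  | cons o t ih => simp [List.foldl, pvW, ih]

theorem foldA_eq (offs : List Int) (v : List Int) (s : Nat) (j : Int) (acc : List Int)
    (h : s + offs.length ≤ v.length) :
    ((PySem.List.enumerate offs (s : Int)).foldl
      (fun (st : Int × List Int) io =>
        pyA_while ((PySem.List.pyGet? v io.1).getD 0) st.1 io.2 st.2) (j, acc)).2
      = acc ++ ((v.drop s).zip (pvW offs j)).flatMap (fun iw => List.replicate iw.2.toNat iw.1) := by
  induction offs generalizing s j acc with
  | nil => simp [PySem.List.enumerate_nil, pvW]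
  | cons o t ih =>
    have hs : s < v.length := by simp at h; omega
    rw [PySem.List.enumerate_cons, List.foldl_cons]
    have hget : PySem.List.pyGet? v (s : Int) = some v[s] := by
      rw [PySem.List.pyGet?_natCast]
      exact List.getElem?_eq_getElem hs
    have hdrop : v.drop s = v[s] :: v.drop (s + 1) := List.drop_eq_getElem_cons hs
    have hcast : (s : Int) + 1 = ((s + 1 : Nat) : Int) := by push_cast; ring
    have hstep : pyA_while ((PySem.List.pyGet? v ((s : Int), o).1).getD 0)
        ((j, acc) : Int × List Int).1 ((s : Int), o).2 ((j, acc) : Int × List Int).2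
        = (max j o, acc ++ List.replicate (o - j).toNat v[s]) := by
      simp [hget, pyA_while_eq]
    rw [hstep, hcast]
    rw [ih (s + 1) (max j o) (acc ++ List.replicate (o - j).toNat v[s]) (by simp at h ⊢; omega)]
    rw [hdrop]
    simp only [pvW, List.zip_cons_cons, List.flatMap_cons, List.append_assoc]
    have : (o - j).toNat = (max 0 (o - j)).toNat := by omega
    rw [this]

-- ===== VERDICT (by name: the statement is the Claim_ definition above) =====
theorem convert_verb_indices_to_wordpiece_indices_py_spec : Claim_equal_convert_verb_indices_to_wordpiece_indices_py := by
  intro v offs binary _ hpre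
  obtain ⟨hb, hlen⟩ := hpre
  subst hb
  unfold Spec_convert_verb_indices_to_wordpiece_indices_py
  unfold convert_verb_indices_to_wordpiece_indices_py convert_verb_indices_to_wordpiece_indices_py_alt
  have hA := foldA_eq offs v 0 0 [] (by simpa using hlen)
  simp only [Nat.cast_zero, List.drop_zero, List.nil_append] at hA
  simp [hA, foldB_eq]
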